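-- pv_equiv track=rewrite | github.com/MrityunjayBhardwaj/anvikshiki_ecosystem | anvikshiki_v4/predicate_extraction.py | _cluster_by_tokens
-- ===== SOURCE A (Python) =====
-- def _cluster_by_tokens(
--     predicates: dict[str, str],
-- ) -> list[list[str]]:
--     """Cluster predicates sharing >50% tokens (cheap heuristic)."""
--     names = list(predicates.keys())
--     token_sets = {n: set(n.split("_")) for n in names}
--     visited: set[str] = set()
--     clusters: list[list[str]] = []
--
--     for n in names:
--         if n in visited:
--             continue
--         cluster = [n]
--         visited.add(n)
--         for m in names:
--             if m in visited:
--                 continue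
--             overlap = len(token_sets[n] & token_sets[m])
--             total = min(len(token_sets[n]), len(token_sets[m]))
--             if total > 0 and overlap / total > 0.5:
--                 cluster.append(m)
--                 visited.add(m)
--         clusters.append(cluster)
--
--     return clusters
-- ===== SOURCE B (Python) =====
-- def _cluster_by_tokens(
--     predicates: dict[str, str],
-- ) -> list[list[str]]:
--     """Cluster predicates sharing >50% tokens (cheap heuristic)."""
--
--     def go(items: list) -> list[list[str]]:
--         if not items:
--             return []
--         (head, ht), rest = items[0], items[1:]
--         mates, others = [], []
--         for m, t in rest:
--             if 2 * len(ht & t) > min(len(ht), len(t)):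
--                 mates.append(m)
--             else:
--                 others.append((m, t))
--         return [[head] + mates] + go(others)
--
--     return go([(n, set(n.split("_"))) for n in predicates])
-- ===== Notes on version B (the rewrite author's own statement) =====
-- stated objective: alternative
-- what changed: Replaces the visited-set bookkeeping with nested rescans of the full name list by a shrinking worklist of (name, token-set) pairs that is partitioned in a single pass per cluster, and drops the redundant 'total > 0' test (token sets are never empty).
import Mathlib
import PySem

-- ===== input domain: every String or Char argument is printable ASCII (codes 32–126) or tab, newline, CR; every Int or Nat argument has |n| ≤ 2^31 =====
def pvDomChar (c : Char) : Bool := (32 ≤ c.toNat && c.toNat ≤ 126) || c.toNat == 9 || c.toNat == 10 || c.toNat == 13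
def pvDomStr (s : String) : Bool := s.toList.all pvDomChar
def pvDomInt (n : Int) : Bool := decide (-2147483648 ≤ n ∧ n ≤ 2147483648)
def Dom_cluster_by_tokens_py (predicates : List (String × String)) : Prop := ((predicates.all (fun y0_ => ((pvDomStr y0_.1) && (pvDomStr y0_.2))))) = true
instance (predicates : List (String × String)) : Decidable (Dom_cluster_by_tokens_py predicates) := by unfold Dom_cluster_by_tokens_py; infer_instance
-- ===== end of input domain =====

-- B replaces A's visited-set bookkeeping (nested rescans of the full name list) by a shrinking
-- worklist that is partitioned in one pass per cluster, carrying each name's token set alongside it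
-- (objective: alternative decomposition; same asymptotic cost).

-- ===== PORT A =====
-- Port of the original: names = dict keys; token_sets built as a dict keyed by name; visited set +
-- clusters accumulator; 'overlap / total > 0.5' on ints is exactly '2 * overlap > total' (ported so).
-- token_sets[n] never raises (every n ∈ names is a key), so getD's default is never used.
def cluster_by_tokens_py (predicates : List (String × String)) : List (List String) :=
  let names := (PySem.Dict.ofList predicates).keys
  let token_sets : PySem.Dict String (PySem.Set String) :=
    names.foldl (fun d n => d.insert n (PySem.Set.ofList ((PySem.Str.split? n "_").getD []))) PySem.Dict.empty
  let res := names.foldl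
    (fun (st : PySem.Set String × List (List String)) n =>
      if PySem.Set.contains st.1 n then st
      else
        let inner := names.foldl
          (fun (st2 : List String × PySem.Set String) m =>
            if PySem.Set.contains st2.2 m then st2
            else
              let overlap := PySem.Set.len (PySem.Set.inter (token_sets.getD n PySem.Set.empty) (token_sets.getD m PySem.Set.empty))
              let total := min (PySem.Set.len (token_sets.getD n PySem.Set.empty)) (PySem.Set.len (token_sets.getD m PySem.Set.empty))
              if 0 < total ∧ 2 * overlap > total then (st2.1 ++ [m], PySem.Set.add st2.2 m) else st2)
          ([n], PySem.Set.add st.1 n)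
        (inner.2, st.2 ++ [inner.1]))
    (PySem.Set.empty, ([] : List (List String)))
  res.2

-- ===== PORT B =====
-- the loop body's condition '2 * len(ht & t) > min(len(ht), len(t))'
def pvSim (ht t : PySem.Set String) : Bool :=
  decide (2 * PySem.Set.len (PySem.Set.inter ht t) > min (PySem.Set.len ht) (PySem.Set.len t))

-- the single partition pass 'for m, t in rest: …' of Source B (one step of it)
def pvStepB (ht : PySem.Set String)
    (acc : List String × List (String × PySem.Set String)) (mt : String × PySem.Set String) :
    List String × List (String × PySem.Set String) :=
  if pvSim ht mt.2 then (acc.1 ++ [mt.1], acc.2) else (acc.1, acc.2 ++ [mt])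

-- closed form of the partition pass (cited by pvGo's termination proof)
theorem pvStepB_foldl (ht : PySem.Set String) (rest : List (String × PySem.Set String))
    (ma : List String) (ot : List (String × PySem.Set String)) :
    rest.foldl (pvStepB ht) (ma, ot) =
      (ma ++ (rest.filter (fun mt => pvSim ht mt.2)).map Prod.fst,
       ot ++ rest.filter (fun mt => !pvSim ht mt.2)) := by
  induction rest generalizing ma ot with
  | nil => simp
  | cons mt rest ih =>
    by_cases h : pvSim ht mt.2 = true <;>
      simp [pvStepB, h, ih]

def pvPartB (ht : PySem.Set String) (rest : List (String × PySem.Set String)) :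
    List String × List (String × PySem.Set String) :=
  rest.foldl (pvStepB ht) (([] : List String), ([] : List (String × PySem.Set String)))

theorem pvPartB_snd_len (ht : PySem.Set String) (rest : List (String × PySem.Set String)) :
    (pvPartB ht rest).2.length ≤ rest.length := by
  rw [pvPartB, pvStepB_foldl]
  simpa using List.length_filter_le _ _

-- Source B's while loop: each iteration consumes the worklist head and partitions the remainder
def pvGo : List (String × PySem.Set String) → List (List String)
  | [] => []
  | (head, ht) :: rest =>
    let p := pvPartB ht rest
    (head :: p.1) :: pvGo p.2
termination_by items => items.length
decreasing_by
  exact Nat.lt_succ_of_le (pvPartB_snd_len ht rest)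

def cluster_by_tokens_py_alt (predicates : List (String × String)) : List (List String) :=
  pvGo (((PySem.Dict.ofList predicates).keys).map
    (fun n => (n, PySem.Set.ofList ((PySem.Str.split? n "_").getD []))))

-- ===== PRECONDITION & SPEC =====
def Spec_cluster_by_tokens_py (predicates : List (String × String)) (out : List (List String)) : Prop := out = cluster_by_tokens_py_alt predicates
instance (predicates : List (String × String)) (out : List (List String)) : Decidable (Spec_cluster_by_tokens_py predicates out) := by unfold Spec_cluster_by_tokens_py; infer_instance

-- ===== CLAIM (what is proved, stated in full; the proofs are below) =====
def Claim_equal_cluster_by_tokens_py : Prop := ∀ (predicates : List (String × String)), Dom_cluster_by_tokens_py predicates → Spec_cluster_by_tokens_py predicates (cluster_by_tokens_py predicates)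

-- ===== LEMMAS AND PROOFS =====

def pvTok (n : String) : PySem.Set String := PySem.Set.ofList ((PySem.Str.split? n "_").getD [])

-- string-level similarity (both programs' acceptance test, after token sets are resolved)
def pvSim' (n m : String) : Bool := pvSim (pvTok n) (pvTok m)

-- ghost: B's recursion expressed on plain name lists
def pvGoS : List String → List (List String)
  | [] => []
  | n :: rest =>
    (n :: rest.filter (fun m => pvSim' n m)) :: pvGoS (rest.filter (fun m => !pvSim' n m))
termination_by l => l.length
decreasing_by
  simpa [List.length_unattach, List.length_attach] using
    Nat.lt_succ_of_le (List.length_filter_le _ rest.attach)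

-- abstract form of A's inner loop step
def pvStepIn (n : String) (st : List String × PySem.Set String) (m : String) :
    List String × PySem.Set String :=
  if PySem.Set.contains st.2 m then st
  else if pvSim' n m then (st.1 ++ [m], PySem.Set.add st.2 m) else st

-- abstract form of A's outer loop step
def pvStepOut (names : List String) (st : PySem.Set String × List (List String)) (n : String) :
    PySem.Set String × List (List String) :=
  if PySem.Set.contains st.1 n then st
  else
    let inner := names.foldl (pvStepIn n) ([n], PySem.Set.add st.1 n)
    (inner.2, st.2 ++ [inner.1])


-- Boolean forms of Set membership after add/update
theorem pv_contains_add (s : PySem.Set String) (x y : String) :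
    PySem.Set.contains (PySem.Set.add s x) y = (PySem.Set.contains s y || y == x) := by
  rw [Bool.eq_iff_iff]
  simp [PySem.Set.mem_add]

theorem pv_contains_update (s : PySem.Set String) (l : List String) (y : String) :
    PySem.Set.contains (PySem.Set.update s l) y = (PySem.Set.contains s y || decide (y ∈ l)) := by
  rw [Bool.eq_iff_iff]
  simp [PySem.Set.mem_update]

-- A's inner loop over a duplicate-free list appends exactly the unvisited similar names
theorem pv_inner (n : String) (ms : List String) (hnd : ms.Nodup) :
    ∀ cl vis, ms.foldl (pvStepIn n) (cl, vis) =
      (cl ++ ms.filter (fun m => !PySem.Set.contains vis m && pvSim' n m),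
       PySem.Set.update vis (ms.filter (fun m => !PySem.Set.contains vis m && pvSim' n m))) := by
  induction ms with
  | nil => intro cl vis; simp [PySem.Set.update]
  | cons m ms ih =>
    intro cl vis
    have hmn : m ∉ ms := (List.nodup_cons.1 hnd).1
    have hnd' : ms.Nodup := (List.nodup_cons.1 hnd).2
    by_cases hv : PySem.Set.contains vis m = true
    · simp only [List.foldl_cons, pvStepIn, hv, if_true, List.filter_cons, Bool.not_true,
        Bool.false_and]
      exact ih hnd' cl vis
    · rw [Bool.not_eq_true] at hv
      by_cases hs : pvSim' n m = true
      · simp only [List.foldl_cons, pvStepIn, hv, Bool.false_eq_true, if_false, hs, if_true]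
        rw [ih hnd' (cl ++ [m]) (PySem.Set.add vis m)]
        have hfeq : ms.filter (fun m' => !PySem.Set.contains (PySem.Set.add vis m) m' && pvSim' n m')
            = ms.filter (fun m' => !PySem.Set.contains vis m' && pvSim' n m') := by
          apply List.filter_congr
          intro x hx
          have : (x == m) = false := by
            simp only [beq_eq_false_iff_ne]; rintro rfl; exact hmn hx
          rw [pv_contains_add, this, Bool.or_false]
        rw [hfeq]
        have hpf : List.filter (fun m' => !PySem.Set.contains vis m' && pvSim' n m') (m :: ms)
            = m :: List.filter (fun m' => !PySem.Set.contains vis m' && pvSim' n m') ms := by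
          have hm : m ∉ vis := fun hmem => by
            rw [(PySem.Set.contains_iff vis m).2 hmem] at hv; exact absurd hv (by simp)
          rw [List.filter_cons_of_pos]; simp [hs, hm]
        rw [hpf, PySem.Set.update_cons]
        simp
      · simp only [List.foldl_cons, pvStepIn, hv, Bool.false_eq_true, if_false, hs, if_false]
        rw [ih hnd' cl vis]
        simp [hs]

-- intersection cardinality is bounded by both cardinalities
theorem pv_len_inter_le (s t : PySem.Set String) (hs : s.Nodup) :
    PySem.Set.len (PySem.Set.inter s t) ≤ min (PySem.Set.len s) (PySem.Set.len t) := by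
  have hnd := PySem.Set.nodup_inter s t hs
  have h1 : (PySem.Set.inter s t).length ≤ s.length :=
    (List.subperm_of_subset hnd (fun x hx => ((PySem.Set.mem_inter s t x).1 hx).1)).length_le
  have h2 : (PySem.Set.inter s t).length ≤ t.length :=
    (List.subperm_of_subset hnd (fun x hx => ((PySem.Set.mem_inter s t x).1 hx).2)).length_le
  simp only [PySem.Set.len]
  omega

-- A's acceptance test ('total > 0 and overlap/total > 0.5') is B's ('2*overlap > total')
theorem pv_cond (n m : String) :
    (0 < min (PySem.Set.len (pvTok n)) (PySem.Set.len (pvTok m)) ∧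
      2 * PySem.Set.len (PySem.Set.inter (pvTok n) (pvTok m)) >
        min (PySem.Set.len (pvTok n)) (PySem.Set.len (pvTok m)))
    ↔ pvSim' n m = true := by
  have h := pv_len_inter_le (pvTok n) (pvTok m) (PySem.Set.nodup_ofList _)
  simp only [pvSim', pvSim, decide_eq_true_eq]
  omega

-- greedy pass with a visited set = recursive partition of the unvisited remainder
theorem pv_outer (names : List String) (hnn : names.Nodup) :
    ∀ (outer : List String), outer.Sublist names → ∀ (vis : PySem.Set String) (acc : List (List String)),
      names.filter (fun m => !PySem.Set.contains vis m) = outer.filter (fun m => !PySem.Set.contains vis m) →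
      (outer.foldl (pvStepOut names) (vis, acc)).2
        = acc ++ pvGoS (outer.filter (fun m => !PySem.Set.contains vis m)) := by
  intro outer
  induction outer with
  | nil => intro _ vis acc _; simp [pvGoS]
  | cons n outer' ih =>
    intro hsub vis acc hsync
    have hsub' : outer'.Sublist names := (List.sublist_cons_self n outer').trans hsub
    have hnd : (n :: outer').Nodup := List.Nodup.sublist hsub hnn
    have hmem : n ∈ names := hsub.subset List.mem_cons_self
    have hnot : n ∉ outer' := (List.nodup_cons.1 hnd).1
    rw [List.foldl_cons, pvStepOut]
    by_cases hv : PySem.Set.contains vis n = true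
    · rw [if_pos hv]
      have hfc : (n :: outer').filter (fun m => !PySem.Set.contains vis m)
          = outer'.filter (fun m => !PySem.Set.contains vis m) := by
        rw [List.filter_cons_of_neg (by rw [hv]; simp)]
      rw [hfc] at hsync ⊢
      exact ih hsub' vis acc hsync
    · rw [if_neg hv]
      rw [Bool.not_eq_true] at hv
      rw [pv_inner n names hnn [n] (PySem.Set.add vis n)]
      -- abbreviations
      set R := outer'.filter (fun m => !PySem.Set.contains vis m) with hR
      set M := names.filter (fun m => !PySem.Set.contains (PySem.Set.add vis n) m && pvSim' n m) with hMdef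
      have hsyncn : names.filter (fun m => !PySem.Set.contains vis m) = n :: R := by
        rw [hsync, List.filter_cons_of_pos (by rw [hv]; rfl)]
      have hRmem : ∀ m ∈ R, m ≠ n := by
        intro m hm hmn; exact hnot (hmn ▸ (List.mem_filter.1 hm).1)
      have hM : M = R.filter (fun m => pvSim' n m) := by
        have h1 : (fun m => !PySem.Set.contains (PySem.Set.add vis n) m && pvSim' n m)
            = fun m => (!(m == n) && pvSim' n m) && !PySem.Set.contains vis m := by
          funext m; rw [pv_contains_add]
          cases PySem.Set.contains vis m <;> cases h : (m == n) <;> cases pvSim' n m <;> rfl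
        rw [hMdef, h1, ← List.filter_filter, hsyncn, List.filter_cons_of_neg (by simp)]
        refine List.filter_congr ?_
        intro m hm
        have : (m == n) = false := by simp [hRmem m hm]
        simp [this]
      -- the new visited set and its filter characterisation
      set vis' := PySem.Set.update (PySem.Set.add vis n) M with hvis'
      have hptw : ∀ m, PySem.Set.contains vis' m
          = ((PySem.Set.contains vis m || (m == n)) || decide (m ∈ M)) := by
        intro m; rw [hvis', pv_contains_update, pv_contains_add]
      have hMiff : ∀ m ∈ R, (decide (m ∈ M) : Bool) = pvSim' n m := by
        intro m hm
        by_cases hs : pvSim' n m = true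
        · simp [hM, List.mem_filter, hm, hs]
        · rw [Bool.not_eq_true] at hs
          simp [hM, List.mem_filter, hs]
      have hchain : ∀ (L : List String),
          L.filter (fun m => !PySem.Set.contains vis' m)
            = ((L.filter (fun m => !PySem.Set.contains vis m)).filter
                (fun m => !(m == n))).filter (fun m => !decide (m ∈ M)) := by
        intro L
        rw [List.filter_filter, List.filter_filter]
        refine (List.filter_congr ?_)
        intro m _
        rw [hptw m]
        cases PySem.Set.contains vis m <;> cases (m == n) <;> cases decide (m ∈ M) <;> rfl
      have htail : (R.filter (fun m => !(m == n))).filter (fun m => !decide (m ∈ M))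
          = R.filter (fun m => !pvSim' n m) := by
        have hRn : R.filter (fun m => !(m == n)) = R :=
          List.filter_eq_self.2 (fun m hm => by simp [hRmem m hm])
        rw [hRn]
        refine List.filter_congr ?_
        intro m hm
        rw [hMiff m hm]
      have hnamesu' : names.filter (fun m => !PySem.Set.contains vis' m)
          = R.filter (fun m => !pvSim' n m) := by
        rw [hchain names, hsyncn, List.filter_cons_of_neg (by simp), htail]
      have houteru' : outer'.filter (fun m => !PySem.Set.contains vis' m)
          = R.filter (fun m => !pvSim' n m) := by
        rw [hchain outer', ← hR, htail]
      have hsync' : names.filter (fun m => !PySem.Set.contains vis' m)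
          = outer'.filter (fun m => !PySem.Set.contains vis' m) :=
        hnamesu'.trans houteru'.symm
      show (outer'.foldl (pvStepOut names) (vis', acc ++ [n :: M])).2
          = acc ++ pvGoS ((n :: outer').filter (fun m => !PySem.Set.contains vis m))
      rw [ih hsub' vis' (acc ++ [n :: M]) hsync', houteru']
      rw [List.filter_cons_of_pos (by rw [hv]; rfl), ← hR, pvGoS, hM]
      simp

-- B's worklist recursion, viewed on the names alone
theorem pvGo_map_aux : ∀ (k : Nat) (names : List String), names.length ≤ k →
    pvGo (names.map (fun n => (n, pvTok n))) = pvGoS names := by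
  intro k
  induction k with
  | zero =>
    intro names h
    have h0 : names = [] := List.eq_nil_of_length_eq_zero (Nat.le_zero.1 h)
    subst h0; simp [pvGo, pvGoS]
  | succ k ih =>
    intro names h
    cases names with
    | nil => simp [pvGo, pvGoS]
    | cons n rest =>
      rw [List.map_cons, pvGo, pvGoS, pvPartB, pvStepB_foldl]
      simp only [List.nil_append, List.filter_map, List.map_map, Function.comp_def]
      rw [List.map_id']
      have hc : (fun m => pvSim (pvTok n) (pvTok m)) = fun m => pvSim' n m := rfl
      have hc2 : (fun m => !pvSim (pvTok n) (pvTok m)) = fun m => !pvSim' n m := rfl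
      rw [hc, hc2]
      have hlen : (rest.filter (fun m => !pvSim' n m)).length ≤ k :=
        le_trans (List.length_filter_le _ _) (by simpa using h)
      rw [ih _ hlen]

theorem pvGo_map (names : List String) :
    pvGo (names.map (fun n => (n, pvTok n))) = pvGoS names :=
  pvGo_map_aux names.length names (le_refl _)

-- port A computes the abstract greedy pass
theorem pv_A_abstract (predicates : List (String × String)) :
    cluster_by_tokens_py predicates
      = (((PySem.Dict.ofList predicates).keys).foldl
          (pvStepOut ((PySem.Dict.ofList predicates).keys)) (PySem.Set.empty, [])).2 := by
  have hnn := PySem.Dict.nodup_keys_ofList predicates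
  simp only [cluster_by_tokens_py]
  set names := (PySem.Dict.ofList predicates).keys with hnames
  set tokd := names.foldl
      (fun d n => d.insert n (PySem.Set.ofList ((PySem.Str.split? n "_").getD []))) PySem.Dict.empty
    with htokd
  have hitems : tokd.items = names.map (fun a => (a, pvTok a)) := by
    rw [htokd]
    exact PySem.Dict.items_foldl_insert_fresh names (fun a => a) (fun a => pvTok a)
      PySem.Dict.empty (fun a _ => PySem.Dict.contains_empty a) (by simpa using hnn)
  have hknd : tokd.keys.Nodup := by
    rw [htokd]
    exact PySem.Dict.nodup_keys_foldl_insert names (fun _ a => pvTok a)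
      PySem.Dict.empty PySem.Dict.nodup_keys_empty
  have hget : ∀ m ∈ names, tokd.getD m PySem.Set.empty = pvTok m := by
    intro m hm
    exact PySem.Dict.getD_of_mem_items tokd
      (by rw [hitems]; exact List.mem_map_of_mem hm) hknd PySem.Set.empty
  refine congrArg Prod.snd ?_
  refine PySem.List.foldl_congr_mem names _ _ _ ?_
  intro st n hn
  rw [pvStepOut]
  have hinner : names.foldl
      (fun (st2 : List String × PySem.Set String) m =>
        if PySem.Set.contains st2.2 m then st2
        else
          if 0 < min (PySem.Set.len (tokd.getD n PySem.Set.empty)) (PySem.Set.len (tokd.getD m PySem.Set.empty)) ∧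
              2 * PySem.Set.len (PySem.Set.inter (tokd.getD n PySem.Set.empty) (tokd.getD m PySem.Set.empty)) >
                min (PySem.Set.len (tokd.getD n PySem.Set.empty)) (PySem.Set.len (tokd.getD m PySem.Set.empty))
          then (st2.1 ++ [m], PySem.Set.add st2.2 m) else st2)
      ([n], PySem.Set.add st.1 n)
    = names.foldl (pvStepIn n) ([n], PySem.Set.add st.1 n) := by
    refine PySem.List.foldl_congr_mem names _ _ _ ?_
    intro st2 m hm
    rw [pvStepIn]
    by_cases hvm : PySem.Set.contains st2.2 m = true
    · rw [if_pos hvm, if_pos hvm]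
    · rw [if_neg hvm, if_neg hvm, hget n hn, hget m hm]
      by_cases hs : pvSim' n m = true
      · rw [if_pos ((pv_cond n m).2 hs), if_pos hs]
      · rw [if_neg (fun hc => hs ((pv_cond n m).1 hc)), if_neg (fun h => hs h)]
  by_cases hv : PySem.Set.contains st.1 n = true
  · rw [if_pos hv, if_pos hv]
  · rw [if_neg hv, if_neg hv, hinner]


-- ===== VERDICT (by name: the statement is the Claim_ definition above) =====
theorem cluster_by_tokens_py_spec : Claim_equal_cluster_by_tokens_py := by
  intro predicates _
  show cluster_by_tokens_py predicates = cluster_by_tokens_py_alt predicates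
  have hnn := PySem.Dict.nodup_keys_ofList predicates
  set names := (PySem.Dict.ofList predicates).keys with hnames
  have hfull : names.filter (fun m => !PySem.Set.contains PySem.Set.empty m) = names := by
    simp [PySem.Set.empty, PySem.Set.contains]
  rw [pv_A_abstract, ← hnames,
    pv_outer names hnn names (List.Sublist.refl names) PySem.Set.empty [] rfl, hfull]
  show pvGoS names = cluster_by_tokens_py_alt predicates
  rw [cluster_by_tokens_py_alt, ← hnames]
  exact (pvGo_map names).symm
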